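-- pv_equiv track=rewrite | github.com/DJGG686/TourBox | tools.py | sortByRelevance
-- ===== SOURCE A (Python) =====
-- def sortByRelevance(list_before_sort):
--     to_sort = []
--     result = []
--     # 计算相关度count
--     for i in list_before_sort:
--         if [i, list_before_sort.count(i)] not in to_sort:
--             to_sort.append([i, list_before_sort.count(i)])
--     # 排序
--     to_sort.sort(key=lambda x: (x[1]), reverse=True)
--     # 剔除隐藏相关度值
--     for [route, num] in to_sort:
--         result.append(route)
--     return result
-- ===== SOURCE B (Python) =====
-- def sortByRelevance(list_before_sort):
--     # count frequencies in one pass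
--     counts = {}
--     for i in list_before_sort:
--         counts[i] = counts.get(i, 0) + 1
--     # bucket the distinct items (first-occurrence order) by their count
--     buckets = {}
--     seen = set()
--     for i in list_before_sort:
--         if i not in seen:
--             seen.add(i)
--             c = counts[i]
--             if c in buckets:
--                 buckets[c].append(i)
--             else:
--                 buckets[c] = [i]
--     # emit buckets by descending count
--     result = []
--     for c in sorted(buckets.keys(), reverse=True):
--         result.extend(buckets[c])
--     return result
-- ===== Notes on version B (the rewrite author's own statement) =====
-- stated objective: faster
-- what changed: Replaces A's per-element list.count calls and pair-list membership dedup plus a comparison sort of all (item,count) pairs with a single counting pass over a dict, count-keyed buckets filled in first-occurrence order, and a sort of the distinct counts only.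
import Mathlib
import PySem

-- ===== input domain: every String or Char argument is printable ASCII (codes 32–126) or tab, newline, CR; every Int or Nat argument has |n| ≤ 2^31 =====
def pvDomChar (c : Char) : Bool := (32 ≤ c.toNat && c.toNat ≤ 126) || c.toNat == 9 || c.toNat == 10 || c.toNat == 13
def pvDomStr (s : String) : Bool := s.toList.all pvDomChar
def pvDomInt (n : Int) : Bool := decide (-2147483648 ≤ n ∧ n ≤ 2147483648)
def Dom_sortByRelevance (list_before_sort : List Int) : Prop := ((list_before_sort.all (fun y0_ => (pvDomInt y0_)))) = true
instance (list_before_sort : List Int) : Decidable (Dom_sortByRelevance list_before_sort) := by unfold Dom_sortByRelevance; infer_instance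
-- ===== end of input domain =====

-- B replaces A's repeated-count dedup of (item, count) pairs + comparison sort of all pairs
-- with one counting pass, count-keyed buckets filled in first-occurrence order, and a sort
-- of the distinct counts only (objective: a genuinely different algorithm, same value).

-- ===== PORT A =====
def sortByRelevance (list_before_sort : List Int) : List Int :=
  -- the loop appending [i, list_before_sort.count(i)] when the pair is not already in to_sort
  let to_sort : List (Int × Int) := list_before_sort.foldl
    (fun acc i =>
      if (i, (PySem.List.count list_before_sort i : Int)) ∈ acc then acc
      else acc ++ [(i, (PySem.List.count list_before_sort i : Int))]) []
  -- to_sort.sort(key=lambda x: x[1], reverse=True)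
  let ts := PySem.List.sorted to_sort (fun x => x.2) true
  -- for [route, num] in ts: result.append(route)
  ts.foldl (fun acc p => acc ++ [p.1]) []

-- ===== PORT B =====
def sortByRelevance_alt (list_before_sort : List Int) : List Int :=
  -- counts[i] = counts.get(i, 0) + 1
  let counts : PySem.Dict Int Int :=
    list_before_sort.foldl (fun d i => d.insert i (d.getD i 0 + 1)) PySem.Dict.empty
  -- bucket pass over (buckets, seen); counts[i] never raises (i was just counted), so it is ported as getD i 0
  let st := list_before_sort.foldl
    (fun (st : PySem.Dict Int (List Int) × PySem.Set Int) i =>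
      if st.2.contains i then st
      else
        let c := counts.getD i 0
        (if st.1.contains c then st.1.insert c (st.1.getD c [] ++ [i])
         else st.1.insert c [i],
         PySem.Set.add st.2 i))
    (PySem.Dict.empty, PySem.Set.empty)
  let buckets := st.1
  -- for c in sorted(buckets.keys(), reverse=True): result.extend(buckets[c]); buckets[c] never raises, ported as getD c []
  (PySem.List.sorted buckets.keys (fun x => x) true).foldl
    (fun acc c => acc ++ buckets.getD c []) []

-- ===== PRECONDITION & SPEC =====
def Spec_sortByRelevance (list_before_sort : List Int) (out : List Int) : Prop := out = sortByRelevance_alt list_before_sort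
instance (list_before_sort : List Int) (out : List Int) : Decidable (Spec_sortByRelevance list_before_sort out) := by unfold Spec_sortByRelevance; infer_instance

-- ===== CLAIM (what is proved, stated in full; the proofs are below) =====
def Claim_equal_sortByRelevance : Prop := ∀ (list_before_sort : List Int), Dom_sortByRelevance list_before_sort → Spec_sortByRelevance list_before_sort (sortByRelevance list_before_sort)

-- ===== LEMMAS AND PROOFS =====

theorem pv_toSort_eq (k : Int → Int) (l : List Int) : ∀ (s : List Int),
    l.foldl (fun acc i => if (i, k i) ∈ acc then acc else acc ++ [(i, k i)])
      (s.map (fun j => (j, k j)))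
    = (l.foldl PySem.Set.add s).map (fun j => (j, k j)) := by
  induction l with
  | nil => intro s; rfl
  | cons i l ih =>
    intro s
    simp only [List.foldl_cons]
    by_cases h : i ∈ s
    · have hm : (i, k i) ∈ s.map (fun j => (j, k j)) := List.mem_map.mpr ⟨i, h, rfl⟩
      have ha : PySem.Set.add s i = s := by
        simp [PySem.Set.add, PySem.Set.contains, h]
      rw [if_pos hm, ha, ih]
    · have hm : (i, k i) ∉ s.map (fun j => (j, k j)) := by
        intro hc
        obtain ⟨j, hj, he⟩ := List.mem_map.mp hc
        cases he; exact h hj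
      have ha : PySem.Set.add s i = s ++ [i] := by
        simp [PySem.Set.add, PySem.Set.contains]
        intro hc; exact absurd hc h
      have hmap : (s ++ [i]).map (fun j => (j, k j))
          = s.map (fun j => (j, k j)) ++ [(i, k i)] := by simp
      rw [if_neg hm, ha, ← hmap]
      exact ih (s ++ [i])
def pvBStep (k : Int → Int) (b : PySem.Dict Int (List Int)) (i : Int) : PySem.Dict Int (List Int) :=
  if b.contains (k i) then b.insert (k i) (b.getD (k i) [] ++ [i]) else b.insert (k i) [i]

def pvBk (k : Int → Int) (s : List Int) : PySem.Dict Int (List Int) :=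
  s.foldl (pvBStep k) PySem.Dict.empty

theorem pv_fold_state (k : Int → Int) (l : List Int) : ∀ (s : List Int),
    l.foldl
      (fun (st : PySem.Dict Int (List Int) × PySem.Set Int) i =>
        if st.2.contains i then st
        else (pvBStep k st.1 i, PySem.Set.add st.2 i))
      (pvBk k s, s)
    = (pvBk k (l.foldl PySem.Set.add s), l.foldl PySem.Set.add s) := by
  induction l with
  | nil => intro s; rfl
  | cons i l ih =>
    intro s
    simp only [List.foldl_cons]
    by_cases h : i ∈ s
    · have hc : PySem.Set.contains s i = true := by
        simp [PySem.Set.contains, h]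
      have ha : PySem.Set.add s i = s := by simp [PySem.Set.add, h]
      rw [if_pos hc, ha, ih]
    · have hc : PySem.Set.contains s i = false := by
        simp [PySem.Set.contains, h]
      have ha : PySem.Set.add s i = s ++ [i] := by simp [PySem.Set.add, h]
      have hbk : pvBStep k (pvBk k s) i = pvBk k (s ++ [i]) := by
        simp [pvBk, List.foldl_append]
      rw [if_neg (by simp [h]), ha, hbk]
      exact ih (s ++ [i])

theorem pv_Bk_spec (k : Int → Int) (d : List Int) :
    (pvBk k d).keys = PySem.List.dedup (d.map k)
    ∧ ∀ c, (pvBk k d).getD c [] = d.filter (fun i => decide (k i = c)) := by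
  induction d using List.reverseRecOn with
  | nil => exact ⟨rfl, fun c => rfl⟩
  | append_singleton d i ih =>
    obtain ⟨hk, hg⟩ := ih
    have hbk : pvBk k (d ++ [i]) = pvBStep k (pvBk k d) i := by
      simp [pvBk, List.foldl_append]
    have hdd : PySem.List.dedup ((d ++ [i]).map k)
        = PySem.Set.add (PySem.List.dedup (d.map k)) (k i) := by
      simp only [PySem.List.dedup_eq_ofList, List.map_append, List.map_cons, List.map_nil,
        PySem.Set.ofList, List.foldl_append, List.foldl_cons, List.foldl_nil]
    by_cases h : (pvBk k d).contains (k i)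
    · have hmem : k i ∈ PySem.List.dedup (d.map k) := by
        rw [← hk]; exact (PySem.Dict.contains_iff_mem_keys _ _).mp h
      constructor
      · rw [hbk, pvBStep, if_pos h, PySem.Dict.keys_insert_of_contains _ _ h, hk, hdd]
        have hm' : k i ∈ List.map k d := by
          rw [PySem.List.dedup_eq_ofList, PySem.Set.mem_ofList] at hmem; exact hmem
        obtain ⟨a, ha, hka⟩ := List.mem_map.mp hm'
        simp [PySem.Set.add, PySem.Set.contains]
        exact ⟨a, ha, hka⟩
      · intro c
        rw [hbk, pvBStep, if_pos h, PySem.Dict.getD_insert]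
        by_cases hc : c = k i
        · subst hc
          simp [hg, List.filter_append]
        · rw [if_neg hc, hg, List.filter_append]
          simp [Ne.symm hc]
    · have hmem : k i ∉ PySem.List.dedup (d.map k) := by
        rw [← hk]; intro hm; exact h ((PySem.Dict.contains_iff_mem_keys _ _).mpr hm)
      have hfil : d.filter (fun j => decide (k j = k i)) = [] := by
        rw [List.filter_eq_nil_iff]
        intro j hj hkj
        apply hmem
        rw [PySem.List.dedup_eq_ofList, PySem.Set.mem_ofList]
        exact List.mem_map.mpr ⟨j, hj, by simpa using hkj⟩
      constructor
      · rw [hbk, pvBStep, if_neg h, PySem.Dict.keys_insert_of_not_contains _ _ (by simp [h]), hk, hdd]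
        have hall := List.filter_eq_nil_iff.mp hfil
        simp [PySem.Set.add, PySem.Set.contains]
        intro x hx hkx
        have := hall x hx
        simp [hkx] at this
      · intro c
        rw [hbk, pvBStep, if_neg h, PySem.Dict.getD_insert]
        by_cases hc : c = k i
        · subst hc
          simp [List.filter_append, hfil]
        · rw [if_neg hc, hg, List.filter_append]
          simp [Ne.symm hc]
theorem pv_filter_insertBy {α : Type} (key : α → Int) (x : α) (c : Int) :
    ∀ (ys : List α), ys.Pairwise (fun a b => key b ≤ key a) →
    (PySem.List.insertBy (fun a b => decide (key b < key a)) x ys).filter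
        (fun a => decide (key a = c))
    = if key x = c then ys.filter (fun a => decide (key a = c)) ++ [x]
      else ys.filter (fun a => decide (key a = c)) := by
  intro ys
  induction ys with
  | nil =>
    intro _
    by_cases hx : key x = c <;> simp [PySem.List.insertBy, hx]
  | cons y t ih =>
    intro hp
    have hpt : t.Pairwise (fun a b => key b ≤ key a) := hp.tail
    have hyt : ∀ b ∈ t, key b ≤ key y := fun b hb => List.rel_of_pairwise_cons hp hb
    by_cases hlt : key y < key x
    · -- inserted here: x :: y :: t
      have : PySem.List.insertBy (fun a b => decide (key b < key a)) x (y :: t)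
          = x :: y :: t := by simp [PySem.List.insertBy, hlt]
      rw [this]
      by_cases hx : key x = c
      · have hfe : (y :: t).filter (fun a => decide (key a = c)) = [] := by
          rw [List.filter_eq_nil_iff]
          intro a ha
          rcases List.mem_cons.mp ha with rfl | hat
          · simp; omega
          · have := hyt a hat; simp; omega
        simp [hx, hfe]
      · simp [hx]
    · -- skipped: y :: insertBy x t
      have : PySem.List.insertBy (fun a b => decide (key b < key a)) x (y :: t)
          = y :: PySem.List.insertBy (fun a b => decide (key b < key a)) x t := by
        simp [PySem.List.insertBy, hlt]
      rw [this]
      by_cases hy : key y = c <;> by_cases hx : key x = c <;>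
        simp [hy, hx, ih hpt]

theorem pv_filter_sorted_rev {α : Type} (key : α → Int) (xs : List α) (c : Int) :
    (PySem.List.sorted xs key true).filter (fun a => decide (key a = c))
    = xs.filter (fun a => decide (key a = c)) := by
  induction xs using List.reverseRecOn with
  | nil => rfl
  | append_singleton xs x ih =>
    have hs : PySem.List.sorted (xs ++ [x]) key true
        = PySem.List.insertBy (fun a b => decide (key b < key a)) x
            (PySem.List.sorted xs key true) := by
      rw [PySem.List.sorted_rev_eq_foldl_insertBy, PySem.List.sorted_rev_eq_foldl_insertBy,
        List.foldl_append]
      rfl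
    rw [hs, pv_filter_insertBy key x c _ (PySem.List.sorted_pairwise_rev xs key),
      List.filter_append, ih]
    by_cases hx : key x = c <;> simp [hx]
theorem pv_eq_of_desc_filters {α : Type} (key : α → Int) :
    ∀ (m n : List α), m.Pairwise (fun a b => key b ≤ key a) →
    n.Pairwise (fun a b => key b ≤ key a) →
    (∀ c, m.filter (fun a => decide (key a = c)) = n.filter (fun a => decide (key a = c))) →
    m = n := by
  intro m
  induction m with
  | nil =>
    intro n _ _ hf
    cases n with
    | nil => rfl
    | cons b n' =>
      have := hf (key b)
      simp at this
  | cons a m' ih =>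
    intro n hm hn hf
    cases n with
    | nil =>
      have := hf (key a)
      simp at this
    | cons b n' =>
      have hmt := hm.tail
      have hnt := hn.tail
      have ham : ∀ x ∈ m', key x ≤ key a := fun x hx => List.rel_of_pairwise_cons hm hx
      have hbn : ∀ x ∈ n', key x ≤ key b := fun x hx => List.rel_of_pairwise_cons hn hx
      -- key a = key b
      have hab : key a = key b := by
        have hmem1 : a ∈ (b :: n').filter (fun x => decide (key x = key a)) := by
          rw [← hf (key a)]; simp
        have hA : key a ≤ key b := by
          have := List.mem_filter.mp hmem1
          rcases List.mem_cons.mp this.1 with rfl | hx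
          · rfl
          · exact hbn _ hx
        have hmem2 : b ∈ (a :: m').filter (fun x => decide (key x = key b)) := by
          rw [hf (key b)]; simp
        have hB : key b ≤ key a := by
          have := List.mem_filter.mp hmem2
          rcases List.mem_cons.mp this.1 with rfl | hx
          · rfl
          · exact ham _ hx
        omega
      have hc := hf (key a)
      rw [List.filter_cons, List.filter_cons] at hc
      simp [hab] at hc
      obtain ⟨rfl, htl⟩ := hc
      have : m' = n' := by
        apply ih n' hmt hnt
        intro c
        by_cases hca : c = key a
        · subst hca; exact htl
        · have := hf c
          rw [List.filter_cons, List.filter_cons] at this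
          simpa [show ¬ key a = c by omega, hab ▸ show ¬ key a = c by omega] using this
      rw [this]
theorem pv_flatMap_pairwise {α : Type} (key : α → Int) (cs : List Int) (l : List α)
    (h : cs.Pairwise (· > ·)) :
    (cs.flatMap (fun c => l.filter (fun a => decide (key a = c)))).Pairwise
      (fun a b => key b ≤ key a) := by
  induction cs with
  | nil => simp
  | cons c cs ih =>
    rw [List.flatMap_cons, List.pairwise_append]
    refine ⟨?_, ih h.tail, ?_⟩
    · -- within the first bucket all keys are c
      apply List.Pairwise.imp_of_mem (R := fun a b => True)
      · intro a b ha hb _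
        have := (List.mem_filter.mp ha).2
        have := (List.mem_filter.mp hb).2
        simp_all
      · exact List.pairwise_of_forall_mem_list (by simp)
    · intro a ha b hb
      have hka : key a = c := by simpa using (List.mem_filter.mp ha).2
      obtain ⟨c', hc', hb'⟩ := List.mem_flatMap.mp hb
      have hkb : key b = c' := by simpa using (List.mem_filter.mp hb').2
      have : c > c' := List.rel_of_pairwise_cons h hc'
      omega

theorem pv_flatMap_filter_if {α : Type} (key : α → Int) (cs : List Int) (l : List α)
    (hnd : cs.Nodup) (c0 : Int) :
    (cs.flatMap (fun c => l.filter (fun a => decide (key a = c)))).filter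
        (fun a => decide (key a = c0))
    = if c0 ∈ cs then l.filter (fun a => decide (key a = c0)) else [] := by
  induction cs with
  | nil => simp
  | cons c cs ih =>
    rw [List.flatMap_cons, List.filter_append, ih (List.nodup_cons.mp hnd).2]
    by_cases hc : c = c0
    · subst hc
      have h1 : (l.filter (fun a => decide (key a = c))).filter (fun a => decide (key a = c))
          = l.filter (fun a => decide (key a = c)) := by
        rw [List.filter_filter]; apply List.filter_congr; intro a _; simp
      have hnm : c ∉ cs := (List.nodup_cons.mp hnd).1
      simp [h1, hnm]
    · have h1 : (l.filter (fun a => decide (key a = c))).filter (fun a => decide (key a = c0))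
          = [] := by
        rw [List.filter_filter, List.filter_eq_nil_iff]
        intro a _; simp; omega
      simp [h1, Ne.symm hc]

theorem pv_flatMap_filter {α : Type} (key : α → Int) (cs : List Int) (l : List α)
    (hnd : cs.Nodup) (hcov : ∀ a ∈ l, key a ∈ cs) (c0 : Int) :
    (cs.flatMap (fun c => l.filter (fun a => decide (key a = c)))).filter
        (fun a => decide (key a = c0))
    = l.filter (fun a => decide (key a = c0)) := by
  rw [pv_flatMap_filter_if key cs l hnd c0]
  by_cases hm : c0 ∈ cs
  · simp [hm]
  · rw [if_neg hm]
    symm; rw [List.filter_eq_nil_iff]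
    intro a ha hdec
    have : key a = c0 := by simpa using hdec
    exact hm (this ▸ hcov a ha)

theorem pv_A_eq (xs : List Int) :
    sortByRelevance xs
    = (PySem.List.sorted
        ((PySem.Set.ofList xs).map (fun j => (j, ((PySem.List.count xs j : Nat) : Int))))
        (fun p => p.2) true).map (fun p => p.1) := by
  show (PySem.List.sorted
      (xs.foldl (fun acc i =>
        if (i, ((PySem.List.count xs i : Nat) : Int)) ∈ acc then acc
        else acc ++ [(i, ((PySem.List.count xs i : Nat) : Int))]) [])
      (fun p => p.2) true).foldl (fun acc p => acc ++ [p.1]) []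
    = _
  have h0 := pv_toSort_eq (fun i => ((PySem.List.count xs i : Nat) : Int)) xs []
  simp only [List.map_nil] at h0
  rw [h0, PySem.List.foldl_append_singleton_eq_map (fun p : Int × Int => p.1)]
  rfl

theorem pv_B_eq (xs : List Int) :
    sortByRelevance_alt xs
    = (PySem.List.sorted
        (PySem.List.dedup ((PySem.Set.ofList xs).map (fun j => ((PySem.List.count xs j : Nat) : Int))))
        (fun x => x) true).flatMap
        (fun c => (PySem.Set.ofList xs).filter
          (fun i => decide (((PySem.List.count xs i : Nat) : Int) = c))) := by
  have hkB : (fun i => (xs.foldl (fun d i => d.insert i (d.getD i 0 + 1)) PySem.Dict.empty).getD i 0)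
      = (fun i : Int => ((PySem.List.count xs i : Nat) : Int)) := by
    funext i
    rw [PySem.Dict.getD_foldl_insert_add_one, PySem.Dict.getD_empty]
    simp [PySem.List.count]
  show (PySem.List.sorted
      (xs.foldl
        (fun (st : PySem.Dict Int (List Int) × PySem.Set Int) i =>
          if st.2.contains i then st
          else (pvBStep (fun i => (xs.foldl (fun d i => d.insert i (d.getD i 0 + 1)) PySem.Dict.empty).getD i 0) st.1 i,
                PySem.Set.add st.2 i))
        (PySem.Dict.empty, PySem.Set.empty)).1.keys (fun x => x) true).foldl
      (fun acc c => acc ++ (xs.foldl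
        (fun (st : PySem.Dict Int (List Int) × PySem.Set Int) i =>
          if st.2.contains i then st
          else (pvBStep (fun i => (xs.foldl (fun d i => d.insert i (d.getD i 0 + 1)) PySem.Dict.empty).getD i 0) st.1 i,
                PySem.Set.add st.2 i))
        (PySem.Dict.empty, PySem.Set.empty)).1.getD c []) []
    = _
  rw [hkB]
  have hst := pv_fold_state (fun i : Int => ((PySem.List.count xs i : Nat) : Int)) xs []
  have h1 : pvBk (fun i : Int => ((PySem.List.count xs i : Nat) : Int)) [] = PySem.Dict.empty := rfl
  rw [h1] at hst
  simp only [PySem.Set.empty]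
  rw [hst]
  obtain ⟨hk, hg⟩ := pv_Bk_spec (fun i : Int => ((PySem.List.count xs i : Nat) : Int))
      (xs.foldl PySem.Set.add [])
  rw [hk, PySem.List.foldl_append_eq_flatMap, List.nil_append]
  rw [show (fun c => (pvBk (fun i : Int => ((PySem.List.count xs i : Nat) : Int)) (xs.foldl PySem.Set.add [])).getD c [])
      = (fun c => (xs.foldl PySem.Set.add []).filter (fun i => decide (((PySem.List.count xs i : Nat) : Int) = c)))
    from funext hg]
  rfl

theorem pv_main (xs : List Int) : sortByRelevance xs = sortByRelevance_alt xs := by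
  rw [pv_A_eq, pv_B_eq]
  have hnd_keys : (PySem.List.dedup ((PySem.Set.ofList xs).map (fun j => ((PySem.List.count xs j : Nat) : Int)))).Nodup := by
    rw [PySem.List.dedup_eq_ofList]; exact PySem.Set.nodup_ofList _
  have hperm := PySem.List.sorted_perm
    (PySem.List.dedup ((PySem.Set.ofList xs).map (fun j => ((PySem.List.count xs j : Nat) : Int))))
    (fun x => x) true
  have hnd := hperm.symm.nodup hnd_keys
  have hge := PySem.List.sorted_pairwise_rev
    (PySem.List.dedup ((PySem.Set.ofList xs).map (fun j => ((PySem.List.count xs j : Nat) : Int))))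
    (fun x => x)
  have hgt : (PySem.List.sorted
      (PySem.List.dedup ((PySem.Set.ofList xs).map (fun j => ((PySem.List.count xs j : Nat) : Int))))
      (fun x => x) true).Pairwise (· > ·) := by
    have := hge.and (List.nodup_iff_pairwise_ne.mp hnd)
    exact this.imp (fun h => lt_of_le_of_ne h.1 h.2.symm)
  have hcov : ∀ p ∈ (PySem.Set.ofList xs).map (fun j => (j, ((PySem.List.count xs j : Nat) : Int))),
      (p.2 : Int) ∈ PySem.List.sorted
        (PySem.List.dedup ((PySem.Set.ofList xs).map (fun j => ((PySem.List.count xs j : Nat) : Int))))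
        (fun x => x) true := by
    intro p hp
    obtain ⟨j, hj, rfl⟩ := List.mem_map.mp hp
    rw [PySem.List.mem_sorted, PySem.List.dedup_eq_ofList, PySem.Set.mem_ofList]
    exact List.mem_map.mpr ⟨j, hj, rfl⟩
  have hmain := pv_eq_of_desc_filters (fun p : Int × Int => p.2)
    (PySem.List.sorted ((PySem.Set.ofList xs).map (fun j => (j, ((PySem.List.count xs j : Nat) : Int)))) (fun p => p.2) true)
    ((PySem.List.sorted
        (PySem.List.dedup ((PySem.Set.ofList xs).map (fun j => ((PySem.List.count xs j : Nat) : Int))))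
        (fun x => x) true).flatMap
      (fun c => ((PySem.Set.ofList xs).map (fun j => (j, ((PySem.List.count xs j : Nat) : Int)))).filter
        (fun p => decide (p.2 = c))))
    (PySem.List.sorted_pairwise_rev _ _)
    (pv_flatMap_pairwise _ _ _ hgt)
    (fun c => by
      beta_reduce
      rw [pv_filter_sorted_rev (fun p : Int × Int => p.2),
        pv_flatMap_filter (fun p : Int × Int => p.2) _ _ hnd hcov c])
  rw [hmain, List.map_flatMap]
  congr 1
  funext c
  rw [List.filter_map]
  rw [List.map_map,
    show ((fun p : Int × Int => p.1) ∘ fun j : Int => (j, ((PySem.List.count xs j : Nat) : Int))) = (fun j : Int => j) from rfl,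
    show ((fun p : Int × Int => decide (p.2 = c)) ∘ fun j : Int => (j, ((PySem.List.count xs j : Nat) : Int))) = (fun j : Int => decide (((PySem.List.count xs j : Nat) : Int) = c)) from rfl,
    List.map_id']

-- ===== VERDICT (by name: the statement is the Claim_ definition above) =====
theorem sortByRelevance_spec : Claim_equal_sortByRelevance := by
  intro xs _
  unfold Spec_sortByRelevance
  exact pv_main xs
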